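-- pv_equiv track=rewrite | github.com/ylmeng/coreference | predict.py | prune_clusters
-- ===== SOURCE A (Python) =====
-- import copy
-- from collections import defaultdict
--
-- def prune_clusters(clusters, threshold=1):
--     sizes = defaultdict(int)
--     for item in clusters:
--         sizes[item] += 1
--     remove_list = [x for x in sizes if sizes[x] <= threshold]
--
--     new_clusters = copy.copy(clusters)
--     for i, item in enumerate(clusters):
--         if item in remove_list:
--             new_clusters[i] = 0  # use 0 as dummy label
--     return new_clusters
-- ===== SOURCE B (Python) =====
-- import copy
-- from collections import defaultdict
--
-- def prune_clusters(clusters, threshold=1):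
--     # Group-by-position index: one pass collecting the indices of each label,
--     # then zero whole groups whose size is <= threshold.
--     positions = defaultdict(list)
--     for i, item in enumerate(clusters):
--         positions[item].append(i)
--     new_clusters = copy.copy(clusters)
--     for item, idxs in positions.items():
--         if len(idxs) <= threshold:
--             for i in idxs:
--                 new_clusters[i] = 0  # use 0 as dummy label
--     return new_clusters
-- ===== Notes on version B (the rewrite author's own statement) =====
-- stated objective: alternative
-- what changed: Replaces A's counter + per-element membership re-scan of remove_list with a single group-by-position index (label -> list of indices) and a pass over groups that zeroes whole groups at their recorded positions.
import Mathlib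
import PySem

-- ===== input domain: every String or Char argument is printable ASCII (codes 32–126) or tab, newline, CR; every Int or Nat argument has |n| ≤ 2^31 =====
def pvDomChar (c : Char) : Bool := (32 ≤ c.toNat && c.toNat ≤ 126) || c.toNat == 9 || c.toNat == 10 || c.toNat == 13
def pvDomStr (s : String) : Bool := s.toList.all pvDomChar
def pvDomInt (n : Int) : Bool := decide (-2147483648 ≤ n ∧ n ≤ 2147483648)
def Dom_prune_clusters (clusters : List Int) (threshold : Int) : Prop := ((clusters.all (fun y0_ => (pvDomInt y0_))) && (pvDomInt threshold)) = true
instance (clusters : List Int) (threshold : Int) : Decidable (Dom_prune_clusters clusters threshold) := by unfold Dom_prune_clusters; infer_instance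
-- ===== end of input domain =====

-- B replaces A's counter + per-element membership re-scan with a group-by-position
-- index (label -> indices) and a pass over groups; the return values are proved equal.

-- ===== PORT A =====
def prune_clusters (clusters : List Int) (threshold : Int) : List Int :=
  -- sizes = defaultdict(int); for item in clusters: sizes[item] += 1
  let sizes : PySem.Dict Int Int :=
    clusters.foldl (fun d x => d.modify x 0 (· + 1)) PySem.Dict.empty
  -- remove_list = [x for x in sizes if sizes[x] <= threshold]
  let remove_list : List Int := sizes.keys.filter (fun x => decide (sizes.getD x 0 ≤ threshold))
  -- new_clusters = copy.copy(clusters); for i, item in enumerate(clusters): if item in remove_list: new_clusters[i] = 0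
  (PySem.List.enumerate clusters).foldl
    (fun nc p => if remove_list.contains p.2 then nc.set p.1.toNat 0 else nc) clusters

-- ===== PORT B =====
def prune_clusters_alt (clusters : List Int) (threshold : Int) : List Int :=
  -- positions = defaultdict(list); for i, item in enumerate(clusters): positions[item].append(i)
  let positions : PySem.Dict Int (List Int) :=
    (PySem.List.enumerate clusters).foldl
      (fun d p => d.modify p.2 [] (fun l => l ++ [p.1])) PySem.Dict.empty
  -- new_clusters = copy.copy(clusters); for item, idxs in positions.items(): if len(idxs) <= threshold: for i in idxs: new_clusters[i] = 0
  positions.items.foldl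
    (fun nc kv =>
      if (kv.2.length : Int) ≤ threshold then
        kv.2.foldl (fun acc i => acc.set i.toNat 0) nc
      else nc) clusters

-- ===== PRECONDITION & SPEC =====
def Spec_prune_clusters (clusters : List Int) (threshold : Int) (out : List Int) : Prop := out = prune_clusters_alt clusters threshold
instance (clusters : List Int) (threshold : Int) (out : List Int) : Decidable (Spec_prune_clusters clusters threshold out) := by unfold Spec_prune_clusters; infer_instance

-- ===== CLAIM (what is proved, stated in full; the proofs are below) =====
def Claim_equal_prune_clusters : Prop := ∀ (clusters : List Int) (threshold : Int), Dom_prune_clusters clusters threshold → Spec_prune_clusters clusters threshold (prune_clusters clusters threshold)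

-- ===== LEMMAS AND PROOFS =====

-- setting a list of indices to 0, read back pointwise
theorem setZeros_getElem? (idxs : List Nat) (acc : List Int) (j : Nat) :
    (idxs.foldl (fun a i => a.set i 0) acc)[j]? =
      if j ∈ idxs then acc[j]?.map (fun _ => (0 : Int)) else acc[j]? := by
  induction idxs generalizing acc with
  | nil => simp
  | cons i is ih =>
    rw [List.foldl_cons, ih]
    by_cases hji : j = i
    · subst hji
      rw [List.getElem?_set, if_pos rfl]
      by_cases h : j < acc.length
      · rw [if_pos h, List.getElem?_eq_getElem h]
        split_ifs <;> simp_all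
      · rw [if_neg h, List.getElem?_eq_none (by omega)]
        split_ifs <;> simp
    · rw [List.getElem?_set_ne (fun he => hji he.symm)]
      simp [List.mem_cons, hji]

-- A's conditional enumerate loop, read back pointwise
theorem foldA_getElem? (p : Int → Bool) (xs acc : List Int) (j : Nat) :
    ((PySem.List.enumerate xs).foldl
        (fun nc q => if p q.2 then nc.set q.1.toNat 0 else nc) acc)[j]? =
      if (∃ h : j < xs.length, p xs[j]) then acc[j]?.map (fun _ => (0 : Int)) else acc[j]? := by
  have h1 : ((PySem.List.enumerate xs).foldl
      (fun nc q => if p q.2 then nc.set q.1.toNat 0 else nc) acc)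
      = (((PySem.List.enumerate xs).filter (fun q => p q.2)).map (fun q => q.1.toNat)).foldl
          (fun a i => a.set i 0) acc := by
    rw [List.foldl_map, List.foldl_filter]
  rw [h1, setZeros_getElem?]
  have h2 : (j ∈ ((PySem.List.enumerate xs).filter (fun q => p q.2)).map (fun q => q.1.toNat))
      ↔ (∃ h : j < xs.length, p xs[j]) := by
    constructor
    · rintro hm
      rcases List.mem_map.mp hm with ⟨q, hq, hqj⟩
      rcases List.mem_filter.mp hq with ⟨hqe, hpq⟩
      rcases (PySem.List.mem_enumerate_iff xs 0 q).mp hqe with ⟨k, hk, rfl⟩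
      simp only [zero_add] at hqj hpq ⊢
      have : (k : Int).toNat = k := Int.toNat_natCast k
      exact ⟨by omega, by simpa [this ▸ hqj] using hpq⟩
    · rintro ⟨hj, hp⟩
      refine List.mem_map.mpr ⟨((j : Int), xs[j]), List.mem_filter.mpr ⟨?_, hp⟩, by simp⟩
      exact (PySem.List.mem_enumerate_iff xs 0 _).mpr ⟨j, hj, by simp⟩
  split_ifs with hA hB hB
  · rfl
  · exact absurd (h2.mp hA) hB
  · exact absurd (h2.mpr hB) hA
  · rfl

-- B's group loop, read back pointwise
theorem foldB_getElem? (t : Int) (gs : List (Int × List Int)) (acc : List Int) (j : Nat) :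
    (gs.foldl
        (fun nc kv =>
          if (kv.2.length : Int) ≤ t then
            kv.2.foldl (fun a i => a.set i.toNat 0) nc
          else nc) acc)[j]? =
      if (∃ kv ∈ gs, (kv.2.length : Int) ≤ t ∧ j ∈ kv.2.map Int.toNat)
      then acc[j]?.map (fun _ => (0 : Int)) else acc[j]? := by
  induction gs generalizing acc with
  | nil => simp
  | cons g gs ih =>
    rw [List.foldl_cons]
    simp only [List.exists_mem_cons_iff]
    by_cases hg : (g.2.length : Int) ≤ t
    · rw [if_pos hg, ih]
      have hin : (g.2.foldl (fun a i => a.set i.toNat 0) acc)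
          = ((g.2.map Int.toNat).foldl (fun a i => a.set i 0) acc) := by
        rw [List.foldl_map]
      rw [hin, setZeros_getElem?]
      by_cases hj : j ∈ g.2.map Int.toNat
      · rw [if_pos hj, if_pos (Or.inl ⟨hg, hj⟩)]
        split_ifs <;> simp [Function.comp_def]
      · rw [if_neg hj]
        split_ifs with h1 h2 h2
        · rfl
        · exact absurd (Or.inr h1) h2
        · rcases h2 with ⟨_, hj'⟩ | h2
          · exact absurd hj' hj
          · exact absurd h2 h1
        · rfl
    · rw [if_neg hg, ih]
      split_ifs with h1 h2 h2
      · rfl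
      · exact absurd (Or.inr h1) h2
      · rcases h2 with ⟨hg', _⟩ | h2
        · exact absurd hg' hg
        · exact absurd h2 h1
      · rfl

-- A's removal condition at a valid index is "this label's count is small"
theorem condA_char (clusters : List Int) (t : Int) (j : Nat) :
    (∃ h : j < clusters.length,
        (((clusters.foldl (fun d x => d.modify x 0 (· + 1)) (PySem.Dict.empty : PySem.Dict Int Int)).keys.filter
            (fun x => decide ((clusters.foldl (fun d x => d.modify x 0 (· + 1)) (PySem.Dict.empty : PySem.Dict Int Int)).getD x 0 ≤ t))).contains
          clusters[j]) = true)
      ↔ (∃ h : j < clusters.length, (clusters.count clusters[j] : Int) ≤ t) := by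
  have hc : clusters.foldl (fun d x => d.modify x 0 (· + 1)) (PySem.Dict.empty : PySem.Dict Int Int)
      = PySem.Dict.counter clusters := (PySem.Dict.counter_eq_foldl clusters).symm
  rw [hc]
  constructor
  · rintro ⟨hj, hcon⟩
    rcases List.mem_filter.mp (List.contains_iff_mem.mp hcon) with ⟨-, hle⟩
    refine ⟨hj, ?_⟩
    rw [PySem.Dict.getD_counter] at hle
    exact of_decide_eq_true hle
  · rintro ⟨hj, hle⟩
    refine ⟨hj, List.contains_iff_mem.mpr (List.mem_filter.mpr ⟨?_, ?_⟩)⟩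
    · rw [PySem.Dict.keys_counter]
      exact (PySem.Set.mem_ofList _ _).mpr (clusters.getElem_mem hj)
    · rw [PySem.Dict.getD_counter]
      exact decide_eq_true hle

-- B's zeroing condition at index j is the same statement, through the positions dict
theorem condB_char (clusters : List Int) (t : Int) (j : Nat) :
    (∃ kv ∈ ((PySem.List.enumerate clusters).foldl
          (fun d p => d.modify p.2 [] (fun l => l ++ [p.1]))
          (PySem.Dict.empty : PySem.Dict Int (List Int))).items,
        (kv.2.length : Int) ≤ t ∧ j ∈ kv.2.map Int.toNat)
      ↔ (∃ h : j < clusters.length, (clusters.count clusters[j] : Int) ≤ t) := by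
  have hE := PySem.List.mem_enumerate_iff clusters 0
  set E := PySem.List.enumerate clusters with hEdef
  set d := E.foldl (fun d p => d.modify p.2 [] (fun l => l ++ [p.1]))
      (PySem.Dict.empty : PySem.Dict Int (List Int)) with hd
  have hnd : d.keys.Nodup :=
    PySem.Dict.nodup_keys_foldl_modify_key E (fun p => p.2) [] (fun _ p => (· ++ [p.1])) _
      (by simp)
  have hkeys : ∀ x : Int, x ∈ d.keys ↔ x ∈ clusters := by
    intro x
    rw [hd, PySem.Dict.keys_foldl_modify_key E (fun p => p.2) [] (fun _ p => (· ++ [p.1])), hEdef]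
    simp [PySem.Set.mem_update, PySem.List.map_snd_enumerate, PySem.Dict.keys_empty]
  have hgetD : ∀ x : Int, d.getD x [] = (E.filter (fun p => p.2 == x)).map (fun p => p.1) := by
    intro x
    have hswap : d = ((E.map (fun p => (p.2, p.1))).foldl
        (fun d p => d.modify p.1 [] (fun l => l ++ [p.2])) PySem.Dict.empty) := by
      rw [hd, List.foldl_map]
    rw [hswap, PySem.Dict.getD_foldl_modify_append, PySem.Dict.getD_empty, List.nil_append,
      List.filter_map, List.map_map]
    rfl
  have hlen : ∀ x : Int, ((E.filter (fun p => p.2 == x)).map (fun p => p.1)).length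
      = clusters.count x := by
    intro x
    rw [List.length_map, ← List.countP_eq_length_filter,
      show (fun p : Int × Int => p.2 == x) = ((fun y => y == x) ∘ Prod.snd) from rfl,
      ← List.countP_map, PySem.List.map_snd_enumerate, List.count_eq_countP]
  have hmem : ∀ x : Int,
      (j ∈ (((E.filter (fun p => p.2 == x)).map (fun p => p.1)).map Int.toNat))
        ↔ (∃ h : j < clusters.length, clusters[j] = x) := by
    intro x
    simp only [List.map_map, List.mem_map, List.mem_filter, Function.comp]
    constructor
    · rintro ⟨q, ⟨hqE, hqx⟩, hqj⟩
      rcases (hE q).mp hqE with ⟨k, hk, rfl⟩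
      simp only [zero_add, beq_iff_eq] at hqx hqj
      have hkk : (k : Int).toNat = k := Int.toNat_natCast k
      have hjk : j = k := by rw [← hqj, hkk]
      subst hjk
      exact ⟨hk, hqx⟩
    · rintro ⟨hj, hx⟩
      exact ⟨((j : Int), clusters[j]), ⟨(hE _).mpr ⟨j, hj, by simp⟩, by simpa using hx⟩, by simp⟩
  rw [PySem.Dict.items_eq_map_keys d hnd []]
  constructor
  · rintro ⟨kv, hkv, hle, hjm⟩
    rcases List.mem_map.mp hkv with ⟨x, hxk, rfl⟩
    rw [hgetD x] at hle hjm
    rcases (hmem x).mp hjm with ⟨hj, hx⟩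
    refine ⟨hj, ?_⟩
    rw [hlen x] at hle
    rw [hx]
    exact hle
  · rintro ⟨hj, hle⟩
    refine ⟨(clusters[j], d.getD clusters[j] []),
      List.mem_map.mpr ⟨clusters[j], (hkeys _).mpr (clusters.getElem_mem hj), rfl⟩, ?_, ?_⟩
    · rw [hgetD, hlen]; exact hle
    · rw [hgetD]; exact (hmem _).mpr ⟨hj, rfl⟩

theorem ports_agree (clusters : List Int) (threshold : Int) :
    prune_clusters clusters threshold = prune_clusters_alt clusters threshold := by
  unfold prune_clusters prune_clusters_alt
  apply List.ext_getElem?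
  intro j
  rw [foldA_getElem?, foldB_getElem?]
  rw [if_congr (Iff.trans (condA_char clusters threshold j)
    (condB_char clusters threshold j).symm) rfl rfl]

-- ===== VERDICT (by name: the statement is the Claim_ definition above) =====
theorem prune_clusters_spec : Claim_equal_prune_clusters := by
  intro clusters threshold _
  exact ports_agree clusters threshold
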